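-- pv_equiv track=rewrite | github.com/shosakaue0808/vehicle-storage-search | app.py | expand_request
-- ===== SOURCE A (Python) =====
-- def expand_request(request_items):
--     """
--     Convert vehicle requests with quantities into a simple list of lengths.
--     :param request_items: list of dictinary of requested vehicles.
--     example
--     [
--                 {
--                     "length": 10,
--                     "quantity": 1
--                 },
--                 {
--                     "length": 20,
--                     "quantity": 2
--                 },
--                 {
--                     "length": 25,
--                     "quantity": 1
--                 }
--     ]
--     """
--     vehicles = []
--     for item in request_items:
--         length = item["length"]
--         quantity = item["quantity"]
--         for i in range (quantity):
--             # add each length of vehicles with its quantity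
--             vehicles.append(length)
--     # Sort longest vehicles first
--     vehicles.sort(reverse=True)
--     return vehicles
-- ===== SOURCE B (Python) =====
-- def expand_request(request_items):
--     # Sort the compact item list by length descending first, then expand
--     # quantities; the flat list emerges already sorted (no sort of the big list).
--     vehicles = []
--     for item in sorted(request_items, key=lambda x: x["length"], reverse=True):
--         vehicles += [item["length"]] * item["quantity"]
--     return vehicles
-- ===== Notes on version B (the rewrite author's own statement) =====
-- stated objective: alternative
-- what changed: A expands every quantity into a flat list and then sorts that big list descending; B sorts the small item list by length descending first and then expands, so the output is built already ordered and no final sort runs.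
import Mathlib
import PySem

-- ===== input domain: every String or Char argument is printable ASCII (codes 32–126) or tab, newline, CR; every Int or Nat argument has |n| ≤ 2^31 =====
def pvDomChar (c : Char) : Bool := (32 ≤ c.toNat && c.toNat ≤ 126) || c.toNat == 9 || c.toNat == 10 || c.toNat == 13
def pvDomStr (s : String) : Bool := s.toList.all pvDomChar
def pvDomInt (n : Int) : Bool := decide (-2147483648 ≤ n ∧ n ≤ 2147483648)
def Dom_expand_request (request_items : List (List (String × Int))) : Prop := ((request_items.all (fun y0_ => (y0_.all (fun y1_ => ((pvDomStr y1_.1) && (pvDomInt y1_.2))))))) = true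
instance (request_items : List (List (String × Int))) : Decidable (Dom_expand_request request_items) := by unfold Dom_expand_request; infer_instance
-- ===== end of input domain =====

-- B sorts the small item list by length descending and then expands quantities,
-- instead of A's expand-everything-then-sort; equal return values (A mutates only a local list).


-- ===== PORT A =====
-- dict lookup item[k]: first match in the association list; total via getD 0, guarded by Pre_ (isSome)
def pvLookup (item : List (String × Int)) (k : String) : Int := (item.lookup k).getD 0

def expand_request (request_items : List (List (String × Int))) : List Int :=
  let vehicles : List Int :=
    request_items.foldl (fun vehicles item =>
      (PySem.List.pyRange 0 (pvLookup item "quantity") 1).foldl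
        (fun vehicles _i => vehicles ++ [pvLookup item "length"]) vehicles) []
  PySem.List.sorted vehicles (fun x => x) true

-- ===== PORT B =====
-- [length] * quantity: Python list repetition; negative quantity gives [] = replicate 0 (toNat), exact
def expand_request_alt (request_items : List (List (String × Int))) : List Int :=
  (PySem.List.sorted request_items (fun x => pvLookup x "length") true).foldl
    (fun vehicles item =>
      vehicles ++ List.replicate (pvLookup item "quantity").toNat (pvLookup item "length")) []

-- ===== PRECONDITION & SPEC =====
-- Pre_ excludes exactly the items missing a "length" or "quantity" key, where Python A raises KeyError.
def Pre_expand_request (request_items : List (List (String × Int))) : Prop :=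
  ∀ item ∈ request_items, (item.lookup "length").isSome ∧ (item.lookup "quantity").isSome
instance (request_items : List (List (String × Int))) : Decidable (Pre_expand_request request_items) := by unfold Pre_expand_request; infer_instance

def pvWitness_expand_request : (List (List (String × Int))) :=
  [[("length", 10), ("quantity", 1)], [("length", 20), ("quantity", 2)], [("length", 25), ("quantity", 1)]]

def Spec_expand_request (request_items : List (List (String × Int))) (out : List Int) : Prop := out = expand_request_alt request_items
instance (request_items : List (List (String × Int))) (out : List Int) : Decidable (Spec_expand_request request_items out) := by unfold Spec_expand_request; infer_instance

-- ===== CLAIM (what is proved, stated in full; the proofs are below) =====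
def Claim_equal_expand_request : Prop := ∀ (request_items : List (List (String × Int))), Dom_expand_request request_items → Pre_expand_request request_items → Spec_expand_request request_items (expand_request request_items)

-- ===== LEMMAS AND PROOFS =====

-- the common multiset of lengths: each item contributes its length, quantity times
def pvExp (request_items : List (List (String × Int))) : List Int :=
  request_items.flatMap (fun item => List.replicate (pvLookup item "quantity").toNat (pvLookup item "length"))

-- A's inner append loop over a range is a replicate of the range's length
theorem pv_foldl_const_append (l : Int) (xs : List Int) (acc : List Int) :
    xs.foldl (fun a (_ : Int) => a ++ [l]) acc = acc ++ List.replicate xs.length l := by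
  induction xs generalizing acc with
  | nil => simp
  | cons x xs ih =>
    rw [List.foldl_cons, ih, List.append_assoc]
    simp [List.replicate_succ]

-- A's outer loop accumulates the expansion
theorem pv_outer (ri : List (List (String × Int))) (acc : List Int) :
    ri.foldl (fun vehicles item =>
        (PySem.List.pyRange 0 (pvLookup item "quantity") 1).foldl
          (fun vehicles _i => vehicles ++ [pvLookup item "length"]) vehicles) acc
      = acc ++ pvExp ri := by
  induction ri generalizing acc with
  | nil => simp [pvExp]
  | cons it ri ih =>
    rw [List.foldl_cons, ih, pv_foldl_const_append, PySem.List.length_pyRange_one]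
    simp [pvExp, List.flatMap_cons]

theorem pvA_eq (ri : List (List (String × Int))) :
    expand_request ri = PySem.List.sorted (pvExp ri) (fun x => x) true := by
  unfold expand_request
  rw [pv_outer, List.nil_append]

theorem pvB_eq (ri : List (List (String × Int))) :
    expand_request_alt ri = pvExp (PySem.List.sorted ri (fun x => pvLookup x "length") true) := by
  unfold expand_request_alt pvExp
  rw [PySem.List.foldl_append_eq_flatMap, List.nil_append]

-- expansion of a key-descending item list is descending
theorem pv_flat_pairwise (its : List (List (String × Int)))
    (h : its.Pairwise (fun a b => pvLookup b "length" ≤ pvLookup a "length")) :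
    (pvExp its).Pairwise (fun a b => b ≤ a) := by
  induction its with
  | nil => simp [pvExp]
  | cons it its ih =>
    rw [List.pairwise_cons] at h
    unfold pvExp
    rw [List.flatMap_cons, List.pairwise_append]
    refine ⟨List.pairwise_replicate.mpr (Or.inr le_rfl), ih h.2, ?_⟩
    intro a ha b hb
    rcases List.eq_of_mem_replicate ha with rfl
    rcases List.mem_flatMap.mp hb with ⟨it', hit', hb'⟩
    rcases List.eq_of_mem_replicate hb' with rfl
    exact h.1 it' hit'

theorem pv_main (ri : List (List (String × Int))) :
    PySem.List.sorted (pvExp ri) (fun x => x) true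
      = pvExp (PySem.List.sorted ri (fun x => pvLookup x "length") true) := by
  have hperm : (PySem.List.sorted (pvExp ri) (fun x => x) true).Perm
      (pvExp (PySem.List.sorted ri (fun x => pvLookup x "length") true)) :=
    (PySem.List.sorted_perm (pvExp ri) (fun x => x) true).trans
      ((List.Perm.flatMap
        (PySem.List.sorted_perm ri (fun x => pvLookup x "length") true)
        (fun _ _ => List.Perm.refl _)).symm)
  have hp1 : (PySem.List.sorted (pvExp ri) (fun x => x) true).Pairwise (fun a b => b ≤ a) :=
    PySem.List.sorted_pairwise_rev (pvExp ri) (fun x => x)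
  have hp2 : (pvExp (PySem.List.sorted ri (fun x => pvLookup x "length") true)).Pairwise
      (fun a b => b ≤ a) :=
    pv_flat_pairwise _ (PySem.List.sorted_pairwise_rev ri (fun x => pvLookup x "length"))
  exact List.Perm.eq_of_pairwise (fun a b _ _ h1 h2 => le_antisymm h2 h1) hp1 hp2 hperm

-- ===== VERDICT (by name: the statement is the Claim_ definition above) =====
theorem expand_request_spec : Claim_equal_expand_request := by
  intro ri _ _
  unfold Spec_expand_request
  rw [pvA_eq, pvB_eq, pv_main]
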